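-- pv_equiv track=rewrite | github.com/matthewkover/adventofcode2020 | Day 6/6-2.py | getYes
-- ===== SOURCE A (Python) =====
-- def getYes(responses):
--     questions = []
--
--     for char in responses[0]:
--         inAll = True
--         for line in responses:
--             if char not in line:
--                 inAll = False
--
--         if inAll and char not in questions:
--             questions.append(char)
--
--     return(len(questions))
-- ===== SOURCE B (Python) =====
-- def getYes(responses):
--     # One pass: tally, for each distinct character, how many lines contain it;
--     # then count the characters whose tally equals the number of lines.
--     tally = {}
--     for line in responses:
--         for c in set(line):
--             tally[c] = tally.get(c, 0) + 1
--     n = len(responses)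
--     return sum(1 for v in tally.values() if v == n)
-- ===== Notes on version B (the rewrite author's own statement) =====
-- stated objective: idiomatic
-- what changed: Instead of scanning every line once per character of the first line (with a dedup scan of the answer list), B makes one pass over the lines tallying each line's distinct characters in a dict, then counts the tally entries equal to the number of lines.
import Mathlib
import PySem

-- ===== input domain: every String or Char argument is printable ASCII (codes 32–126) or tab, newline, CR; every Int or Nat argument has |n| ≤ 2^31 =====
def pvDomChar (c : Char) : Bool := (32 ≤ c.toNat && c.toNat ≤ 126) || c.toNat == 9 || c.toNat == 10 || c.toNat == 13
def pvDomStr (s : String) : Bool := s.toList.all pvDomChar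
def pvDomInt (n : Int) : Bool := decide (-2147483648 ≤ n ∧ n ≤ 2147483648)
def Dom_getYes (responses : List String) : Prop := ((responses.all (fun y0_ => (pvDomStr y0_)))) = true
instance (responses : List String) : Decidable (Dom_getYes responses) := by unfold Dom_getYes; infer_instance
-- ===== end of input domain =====

-- B replaces A's char-by-char scan of every line with a one-pass per-line tally
-- (char -> number of lines containing it) filtered afterwards; return value only
-- (neither program mutates its argument). A raises IndexError on [], excluded by Pre_.


-- ===== PORT A =====
def getYes (responses : List String) : Int :=
  match PySem.List.pyGet? responses 0 with
  | none => 0   -- unreachable under Pre_getYes (responses[0] raises IndexError)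
  | some first =>
    ((first.toList.foldl (fun (questions : List Char) char =>
        let inAll := responses.foldl (fun inAll line =>
          if !(line.toList.contains char) then false else inAll) true
        if inAll && !(questions.contains char) then questions ++ [char] else questions)
      []).length : Int)

-- ===== PORT B =====
def getYes_alt (responses : List String) : Int :=
  let tally : PySem.Dict Char Int := responses.foldl
    (fun d line => (PySem.Set.ofList line.toList).foldl
        (fun d c => d.insert c (d.getD c 0 + 1)) d)
    PySem.Dict.empty
  let n : Int := responses.length
  tally.values.foldl (fun acc v => if v == n then acc + 1 else acc) 0

-- ===== PRECONDITION & SPEC =====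
-- Pre_ excludes only the empty list, on which A raises IndexError at responses[0].
def Pre_getYes (responses : List String) : Prop := responses ≠ []
instance (responses : List String) : Decidable (Pre_getYes responses) := by unfold Pre_getYes; infer_instance
def pvWitness_getYes : List String := ["ab", "b"]

def Spec_getYes (responses : List String) (out : Int) : Prop := out = getYes_alt responses
instance (responses : List String) (out : Int) : Decidable (Spec_getYes responses out) := by unfold Spec_getYes; infer_instance

-- ===== CLAIM (what is proved, stated in full; the proofs are below) =====
def Claim_equal_getYes : Prop := ∀ (responses : List String), Dom_getYes responses → Pre_getYes responses → Spec_getYes responses (getYes responses)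

-- ===== LEMMAS AND PROOFS =====

-- all the distinct characters appearing in some line, in first-appearance order
def allChars (responses : List String) : List Char :=
  responses.flatMap (fun line => PySem.Set.ofList line.toList)

-- A's outer loop builds exactly the set of first-line characters contained in every line.
lemma getYes_loop_eq (first : String) (responses : List String) :
    (first.toList.foldl (fun (questions : List Char) char =>
        let inAll := responses.foldl (fun inAll line =>
          if !(line.toList.contains char) then false else inAll) true
        if inAll && !(questions.contains char) then questions ++ [char] else questions)
      [])
    = PySem.Set.ofList (first.toList.filter
        (fun c => responses.all (fun line => line.toList.contains c))) := by
  have hstep : (fun (questions : List Char) (char : Char) =>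
      let inAll := responses.foldl (fun inAll line =>
        if !(line.toList.contains char) then false else inAll) true
      if inAll && !(questions.contains char) then questions ++ [char] else questions)
      = (fun (qs : List Char) (c : Char) =>
          if responses.all (fun line => line.toList.contains c) then PySem.Set.add qs c else qs) := by
    funext qs c
    show (if (responses.foldl (fun inAll line =>
        if !(line.toList.contains c) then false else inAll) true) && !(qs.contains c)
      then qs ++ [c] else qs) = _
    rw [PySem.List.foldl_if_false_eq, ← List.all_eq_not_any_not]
    by_cases hm : c ∈ qs
    · cases h1 : responses.all (fun line => line.toList.contains c)
      · simp
      · simp [hm]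
    · cases h1 : responses.all (fun line => line.toList.contains c)
      · simp
      · simp [hm, PySem.Set.add]
  rw [hstep, ← List.foldl_filter, PySem.Set.ofList_eq_foldl]

-- B's nested tally loop is Counter(allChars responses).
lemma tally_eq (responses : List String) :
    responses.foldl
      (fun d line => (PySem.Set.ofList line.toList).foldl
          (fun d c => d.insert c (d.getD c 0 + 1)) d)
      PySem.Dict.empty
    = PySem.Dict.counter (allChars responses) := by
  rw [← PySem.Dict.foldl_insert_getD_add_one_eq_counter, allChars, List.foldl_flatMap]

-- a char's multiplicity in allChars = the number of lines that contain it
lemma count_allChars (responses : List String) (c : Char) :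
    (allChars responses).count c
      = responses.countP (fun line => line.toList.contains c) := by
  induction responses with
  | nil => simp [allChars]
  | cons l rest ih =>
    have hc : (PySem.Set.ofList l.toList).count c = if c ∈ l.toList then 1 else 0 := by
      rw [List.Nodup.count (PySem.Set.nodup_ofList _)]
      simp [PySem.Set.mem_ofList]
    show (PySem.Set.ofList l.toList ++ allChars rest).count c = _
    rw [List.count_append, hc, ih, List.countP_cons]
    by_cases hm : c ∈ l.toList
    · simp [hm]
      omega
    · simp [hm]

lemma mem_allChars (responses : List String) (c : Char) :
    c ∈ allChars responses ↔ ∃ line ∈ responses, c ∈ line.toList := by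
  simp [allChars, PySem.Set.mem_ofList]

lemma getYes_alt_eq (responses : List String) :
    getYes_alt responses
      = (((PySem.Set.ofList (allChars responses)).filter
            (fun k => ((allChars responses).count k : Int) == (responses.length : Int))).length : Int) := by
  simp only [getYes_alt]
  rw [tally_eq, PySem.List.foldl_beq_add_one,
    PySem.Dict.values_eq_map_keys _ (PySem.Dict.nodup_keys_counter _) 0]
  simp only [PySem.Dict.keys_counter, PySem.Dict.getD_counter, zero_add]
  rw [show ∀ (xs : List Char) (f : Char → Int) (n : Int),
        (xs.map f).count n = xs.countP (fun k => f k == n) from by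
      intro xs f n; rw [List.count_eq_countP, List.countP_map]; rfl,
    List.countP_eq_length_filter]

-- ===== VERDICT (by name: the statement is the Claim_ definition above) =====
theorem getYes_spec : Claim_equal_getYes := by
  intro responses _hdom hpre
  unfold Spec_getYes
  obtain ⟨first, rest, rfl⟩ : ∃ f r, responses = f :: r := by
    cases responses with
    | nil => exact absurd rfl hpre
    | cons f r => exact ⟨f, r, rfl⟩
  rw [getYes_alt_eq]
  show getYes (first :: rest) = _
  unfold getYes
  rw [show PySem.List.pyGet? (first :: rest) 0 = some first from by simp [pysem]]
  dsimp only
  rw [getYes_loop_eq]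
  congr 1
  apply List.Perm.length_eq
  rw [List.perm_ext_iff_of_nodup (PySem.Set.nodup_ofList _)
    ((PySem.Set.nodup_ofList _).filter _)]
  intro c
  simp only [PySem.Set.mem_ofList, List.mem_filter, mem_allChars, count_allChars,
    beq_iff_eq, Nat.cast_inj, List.countP_eq_length, List.all_eq_true]
  constructor
  · rintro ⟨hc, hall⟩
    exact ⟨⟨first, List.mem_cons_self .., hc⟩, hall⟩
  · rintro ⟨-, hall⟩
    refine ⟨?_, hall⟩
    simpa using hall first (List.mem_cons_self ..)
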